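-- pv_equiv track=rewrite | github.com/fumeko-ts/Recolourful-Containers-Bedrock | devopment-scripts/obf.py | unicode_escape_key
-- ===== SOURCE A (Python) =====
-- def unicode_escape_key(key):
--     # Escape each character as \uXXXX, but leave existing \uXXXX sequences intact
--     result = []
--     i = 0
--     while i < len(key):
--         if key[i] == "\\" and i + 5 < len(key) and key[i+1] == "u" and all(c in "0123456789abcdefABCDEF" for c in key[i+2:i+6]):
--             result.append(key[i:i+6])
--             i += 6
--         else:
--             result.append(f"\\u{ord(key[i]):04x}")
--             i += 1
--     return "".join(result)
-- ===== SOURCE B (Python) =====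
-- import re
--
-- _PAT = re.compile(r'\\u[0-9a-fA-F]{4}|[\s\S]')
--
-- def _repl(m):
--     t = m.group()
--     if len(t) == 6:
--         return t
--     return f"\\u{ord(t):04x}"
--
-- def unicode_escape_key(key):
--     return _PAT.sub(_repl, key)
-- ===== Notes on version B (the rewrite author's own statement) =====
-- stated objective: idiomatic
-- what changed: Replaced the manual index/while loop with per-character slicing and an all()-over-hexdigits check by a single compiled re.sub over the whole string with pattern r'\\u[0-9a-fA-F]{4}|[\s\S]' (escape alternative first) and a replacement function that keeps 6-char existing escapes and escapes single characters.
import Mathlib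
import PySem

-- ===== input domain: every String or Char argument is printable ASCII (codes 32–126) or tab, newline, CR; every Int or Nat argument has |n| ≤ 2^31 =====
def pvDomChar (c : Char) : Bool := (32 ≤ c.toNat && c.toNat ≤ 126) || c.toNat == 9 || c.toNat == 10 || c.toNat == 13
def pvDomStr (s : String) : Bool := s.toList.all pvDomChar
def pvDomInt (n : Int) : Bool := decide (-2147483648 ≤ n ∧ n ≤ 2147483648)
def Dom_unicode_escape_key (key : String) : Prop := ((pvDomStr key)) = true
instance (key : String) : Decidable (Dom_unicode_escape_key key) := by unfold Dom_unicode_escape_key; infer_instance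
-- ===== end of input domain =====

-- B replaces A's manual index/while scan with a single regex substitution
-- (r'\\u[0-9a-fA-F]{4}|[\s\S]', escape alternative first); objective: idiomatic.

-- ===== PORT A =====

-- shared formatting helper: f"{n:04x}" for a nonnegative n (lowercase hex, zero-padded to width 4)
def pvHex4 (n : Nat) : List Char :=
  let ds := Nat.toDigits 16 n
  List.replicate (4 - ds.length) '0' ++ ds

-- A's while loop over index i; result is the accumulated list of pieces.
-- All indexing is guarded in range, so List.getD's default is never used.
def pvGoA (cs : List Char) (i : Nat) (result : List String) : List String :=
  if i < cs.length then
    if (cs.getD i ' ' = '\\') ∧ (i + 5 < cs.length) ∧ (cs.getD (i+1) ' ' = 'u')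
        ∧ (((cs.drop (i+2)).take 4).all (fun c => "0123456789abcdefABCDEF".toList.contains c)) then
      pvGoA cs (i+6) (result ++ [String.ofList ((cs.drop i).take 6)])
    else
      pvGoA cs (i+1) (result ++ [String.ofList ('\\' :: 'u' :: pvHex4 (cs.getD i ' ').toNat)])
  else result
termination_by cs.length - i

def unicode_escape_key (key : String) : String :=
  String.join (pvGoA key.toList 0 [])

-- ===== PORT B =====

-- the regex character class [0-9a-fA-F]
def pvHexB (c : Char) : Bool :=
  ('0' ≤ c && c ≤ '9') || ('a' ≤ c && c ≤ 'f') || ('A' ≤ c && c ≤ 'F')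

-- the replacement function: an existing 6-char escape is kept, a single char is escaped
def pvReEsc (c : Char) : List Char := '\\' :: 'u' :: pvHex4 c.toNat

-- try the first alternative of the pattern, r'\\u[0-9a-fA-F]{4}', at the head:
-- on success return (matched text, rest)
def pvMatchEsc (cs : List Char) : Option (List Char × List Char) :=
  match cs with
  | c0 :: c1 :: c2 :: c3 :: c4 :: c5 :: r =>
    if c0 = '\\' ∧ c1 = 'u' ∧ pvHexB c2 ∧ pvHexB c3 ∧ pvHexB c4 ∧ pvHexB c5 then
      some ([c0, c1, c2, c3, c4, c5], r)
    else none
  | _ => none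

lemma pvMatchEsc_length {cs m r} (h : pvMatchEsc cs = some (m, r)) : r.length < cs.length := by
  unfold pvMatchEsc at h
  split at h
  · split at h
    · simp_all; omega
    · simp_all
  · simp_all

-- re.sub scanning: at each position try the escape alternative first, else [\s\S]
def pvSubB (cs : List Char) : List Char :=
  match cs with
  | [] => []
  | ch :: rest =>
    match h : pvMatchEsc (ch :: rest) with
    | some (m, r) => m ++ pvSubB r
    | none => pvReEsc ch ++ pvSubB rest
termination_by cs.length
decreasing_by
  · have := pvMatchEsc_length h; simpa using this
  · simp

def unicode_escape_key_alt (key : String) : String :=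
  String.ofList (pvSubB key.toList)

-- ===== PRECONDITION & SPEC =====
def Spec_unicode_escape_key (key : String) (out : String) : Prop := out = unicode_escape_key_alt key
instance (key : String) (out : String) : Decidable (Spec_unicode_escape_key key out) := by unfold Spec_unicode_escape_key; infer_instance

-- ===== CLAIM (what is proved, stated in full; the proofs are below) =====
def Claim_equal_unicode_escape_key : Prop := ∀ (key : String), Dom_unicode_escape_key key → Spec_unicode_escape_key key (unicode_escape_key key)

-- ===== LEMMAS AND PROOFS =====

lemma hex_contains_iff (c : Char) :
    "0123456789abcdefABCDEF".toList.contains c = pvHexB c := by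
  have h : "0123456789abcdefABCDEF".toList = ['0','1','2','3','4','5','6','7','8','9','a','b','c','d','e','f','A','B','C','D','E','F'] := by decide
  rw [h, Bool.eq_iff_iff]
  simp only [List.contains_eq_mem, List.mem_cons, List.not_mem_nil, or_false, decide_eq_true_eq,
    pvHexB, Bool.or_eq_true, Bool.and_eq_true, Char.ext_iff, Char.le_def,
    UInt32.le_iff_toNat_le, ← UInt32.toNat_inj]
  simp only [show ('0').val.toNat = 48 from rfl, show ('1').val.toNat = 49 from rfl, show ('2').val.toNat = 50 from rfl, show ('3').val.toNat = 51 from rfl, show ('4').val.toNat = 52 from rfl, show ('5').val.toNat = 53 from rfl, show ('6').val.toNat = 54 from rfl, show ('7').val.toNat = 55 from rfl, show ('8').val.toNat = 56 from rfl, show ('9').val.toNat = 57 from rfl, show ('a').val.toNat = 97 from rfl, show ('b').val.toNat = 98 from rfl, show ('c').val.toNat = 99 from rfl, show ('d').val.toNat = 100 from rfl, show ('e').val.toNat = 101 from rfl, show ('f').val.toNat = 102 from rfl, show ('A').val.toNat = 65 from rfl, show ('B').val.toNat = 66 from rfl, show ('C').val.toNat = 67 from rfl, show ('D').val.toNat =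 68 from rfl, show ('E').val.toNat = 69 from rfl, show ('F').val.toNat = 70 from rfl]
  omega

lemma pvMatchEsc_cons6 (c0 c1 c2 c3 c4 c5 : Char) (r : List Char) :
    pvMatchEsc (c0 :: c1 :: c2 :: c3 :: c4 :: c5 :: r) =
      if c0 = '\\' ∧ c1 = 'u' ∧ pvHexB c2 ∧ pvHexB c3 ∧ pvHexB c4 ∧ pvHexB c5 then
        some ([c0, c1, c2, c3, c4, c5], r)
      else none := rfl

lemma join_shift (b : List String) (s : String) :
    List.foldl (fun r t => r ++ t) s b = s ++ List.foldl (fun r t => r ++ t) "" b := by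
  induction b generalizing s with
  | nil => simp
  | cons x xs ih =>
    simp only [List.foldl_cons]
    rw [ih, ih (("" : String) ++ x)]
    simp [String.append_assoc]

lemma join_append (a b : List String) :
    String.join (a ++ b) = String.join a ++ String.join b := by
  simp only [String.join, List.foldl_append]
  exact join_shift b _

lemma matchEsc_none_of_short (cs : List Char) (h : cs.length < 6) : pvMatchEsc cs = none := by
  rcases cs with _ | ⟨a, _ | ⟨b, _ | ⟨c, _ | ⟨d, _ | ⟨e, _ | ⟨f, r⟩⟩⟩⟩⟩⟩ <;>
    simp [pvMatchEsc] at h ⊢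
  omega

lemma goA_subB (n : Nat) (cs : List Char) (i : Nat) (acc : List String)
    (hn : cs.length ≤ i + n) :
    String.join (pvGoA cs i acc) = String.join acc ++ String.ofList (pvSubB (cs.drop i)) := by
  induction n generalizing i acc with
  | zero =>
    rw [pvGoA]
    have h0 : ¬ i < cs.length := by omega
    rw [if_neg h0, List.drop_eq_nil_of_le (by omega), pvSubB]
    simp
  | succ n ih =>
    rw [pvGoA]
    by_cases hi : i < cs.length
    · rw [if_pos hi]
      have hdrop : cs.drop i = cs[i] :: cs.drop (i+1) := List.drop_eq_getElem_cons hi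
      split_ifs with hc
      · obtain ⟨h0, h5, h1, hall⟩ := hc
        have e1 : i + 1 < cs.length := by omega
        have e2 : i + 2 < cs.length := by omega
        have e3 : i + 3 < cs.length := by omega
        have e4 : i + 4 < cs.length := by omega
        have d1 : cs.drop (i+1) = cs[i+1] :: cs.drop (i+2) := List.drop_eq_getElem_cons e1
        have d2 : cs.drop (i+2) = cs[i+2] :: cs.drop (i+3) := List.drop_eq_getElem_cons e2
        have d3 : cs.drop (i+3) = cs[i+3] :: cs.drop (i+4) := List.drop_eq_getElem_cons e3
        have d4 : cs.drop (i+4) = cs[i+4] :: cs.drop (i+5) := List.drop_eq_getElem_cons e4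
        have d5 : cs.drop (i+5) = cs[i+5] :: cs.drop (i+6) := List.drop_eq_getElem_cons h5
        have hgi : cs.getD i ' ' = cs[i] := List.getD_eq_getElem _ _ hi
        have hgi1 : cs.getD (i+1) ' ' = cs[i+1] := List.getD_eq_getElem _ _ e1
        rw [hgi] at h0; rw [hgi1] at h1
        have htake : (cs.drop (i+2)).take 4 = [cs[i+2], cs[i+3], cs[i+4], cs[i+5]] := by
          rw [d2, d3, d4, d5]; rfl
        rw [htake] at hall
        simp only [List.all_cons, List.all_nil, Bool.and_true, Bool.and_eq_true,
          hex_contains_iff] at hall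
        obtain ⟨x2, x3, x4, x5⟩ := hall
        rw [ih (i+6) _ (by omega)]
        rw [join_append]
        have hls : cs.drop i = cs[i] :: cs[i+1] :: cs[i+2] :: cs[i+3] :: cs[i+4] :: cs[i+5] :: cs.drop (i+6) := by
          rw [hdrop, d1, d2, d3, d4, d5]
        rw [hls]
        rw [pvSubB]
        have hm : pvMatchEsc (cs[i] :: cs[i+1] :: cs[i+2] :: cs[i+3] :: cs[i+4] :: cs[i+5] :: cs.drop (i+6))
            = some ([cs[i], cs[i+1], cs[i+2], cs[i+3], cs[i+4], cs[i+5]], cs.drop (i+6)) := by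
          rw [pvMatchEsc_cons6, if_pos ⟨h0, h1, x2, x3, x4, x5⟩]
        rw [hm]
        have htk6 : List.take 6 (cs[i] :: cs[i+1] :: cs[i+2] :: cs[i+3] :: cs[i+4] :: cs[i+5] :: List.drop (i+6) cs) = [cs[i], cs[i+1], cs[i+2], cs[i+3], cs[i+4], cs[i+5]] := rfl
        rw [htk6]
        simp [String.join, ← String.ofList_append, String.append_assoc]
      · rw [ih (i+1) _ (by omega)]
        rw [join_append]
        have hgi : cs.getD i ' ' = cs[i] := List.getD_eq_getElem _ _ hi
        -- show pvSubB (cs.drop i) takes the single-character alternative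
        have hnone : pvMatchEsc (cs.drop i) = none := by
          by_cases h5 : i + 5 < cs.length
          · have e1 : i + 1 < cs.length := by omega
            have e2 : i + 2 < cs.length := by omega
            have e3 : i + 3 < cs.length := by omega
            have e4 : i + 4 < cs.length := by omega
            have hls : cs.drop i = cs[i] :: cs[i+1] :: cs[i+2] :: cs[i+3] :: cs[i+4] :: cs[i+5] :: cs.drop (i+6) := by
              rw [List.drop_eq_getElem_cons hi, List.drop_eq_getElem_cons e1,
                List.drop_eq_getElem_cons e2, List.drop_eq_getElem_cons e3,
                List.drop_eq_getElem_cons e4, List.drop_eq_getElem_cons h5]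
            rw [hls, pvMatchEsc_cons6, if_neg]
            intro ⟨y0, y1, y2, y3, y4, y5⟩
            apply hc
            refine ⟨by rw [hgi]; exact y0, h5, by rw [List.getD_eq_getElem _ _ e1]; exact y1, ?_⟩
            have htake : (cs.drop (i+2)).take 4 = [cs[i+2], cs[i+3], cs[i+4], cs[i+5]] := by
              rw [List.drop_eq_getElem_cons e2, List.drop_eq_getElem_cons e3,
                List.drop_eq_getElem_cons e4, List.drop_eq_getElem_cons h5]; rfl
            rw [htake]
            simp only [List.all_cons, List.all_nil, Bool.and_true, Bool.and_eq_true,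
              hex_contains_iff]
            exact ⟨y2, y3, y4, y5⟩
          · exact matchEsc_none_of_short _ (by simp [List.length_drop]; omega)
        rw [hdrop] at hnone ⊢
        rw [pvSubB, hnone]
        simp [pvReEsc, String.join, List.getElem?_eq_getElem hi, ← String.ofList_append,
          String.append_assoc]
    · rw [if_neg hi]
      rw [List.drop_eq_nil_of_le (by omega), pvSubB]
      simp

-- ===== VERDICT (by name: the statement is the Claim_ definition above) =====
theorem unicode_escape_key_spec : Claim_equal_unicode_escape_key := by
  intro key _
  unfold Spec_unicode_escape_key unicode_escape_key unicode_escape_key_alt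
  have := goA_subB key.toList.length key.toList 0 [] (by omega)
  simpa [String.join] using this
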